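-- pv_equiv track=rewrite | github.com/DaiJitao/algorithm | leetcode_china/demo76.py | isCover
-- ===== SOURCE A (Python) =====
-- def isCover(minStr, t):
--     if len(minStr) < len(t):
--         return False
--
--     converDict = {}
--     for i in minStr:
--         if i in converDict:
--             converDict[i] += 1
--         else:
--             converDict[i] = 1
--
--     for i in t:
--         if i not in converDict:
--             return False
--         else:
--             if converDict[i] == 0:
--                 return False
--             else:
--                 converDict[i] -= 1
--
--     return True
-- ===== SOURCE B (Python) =====
-- def isCover(minStr, t):
--     a = sorted(minStr)
--     b = sorted(t)
--     i = j = 0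
--     while i < len(a) and j < len(b):
--         if a[i] < b[j]:
--             i += 1
--         elif a[i] == b[j]:
--             i += 1
--             j += 1
--         else:
--             return False
--     return j == len(b)
-- ===== Notes on version B (the rewrite author's own statement) =====
-- stated objective: alternative
-- what changed: B sorts both strings and runs a two-pointer merge scan that checks sorted(t) embeds in sorted(minStr), replacing A's hash-count build and per-character decrement walk entirely (no dictionary, no counting, and A's length pre-check is subsumed).
import Mathlib
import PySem

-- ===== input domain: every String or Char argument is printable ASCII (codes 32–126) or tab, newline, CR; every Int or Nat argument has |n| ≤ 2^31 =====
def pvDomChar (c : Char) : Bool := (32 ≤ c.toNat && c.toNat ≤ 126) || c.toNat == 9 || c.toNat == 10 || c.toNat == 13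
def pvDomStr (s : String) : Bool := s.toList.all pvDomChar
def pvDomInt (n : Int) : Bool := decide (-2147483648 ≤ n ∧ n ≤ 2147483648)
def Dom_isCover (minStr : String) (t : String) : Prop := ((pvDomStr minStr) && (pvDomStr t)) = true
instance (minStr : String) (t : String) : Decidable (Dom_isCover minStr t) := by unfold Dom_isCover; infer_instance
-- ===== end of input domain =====

-- B sorts both strings and checks multiset inclusion by a two-pointer merge scan,
-- with no dictionary or counting at all (objective: alternative algorithm).

-- ===== PORT A =====
-- the second 'for i in t' loop of A
def isCoverLoop (d : PySem.Dict Char Int) : List Char → Bool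
  | [] => true
  | c :: rest =>
    if ¬ (d.contains c) then false
    else if d.getD c 0 = 0 then false
    else isCoverLoop (d.insert c (d.getD c 0 - 1)) rest

def isCover (minStr : String) (t : String) : Bool :=
  if PySem.Str.len minStr < PySem.Str.len t then false
  else
    let converDict := minStr.toList.foldl
      (fun d i => if d.contains i then d.insert i (d.getD i 0 + 1) else d.insert i 1)
      PySem.Dict.empty
    isCoverLoop converDict t.toList

-- ===== PORT B =====
-- the 'while i < len(a) and j < len(b)' two-pointer loop of B, with the two
-- suffixes a[i:], b[j:] as the state; 'return j == len(b)' is the b.isEmpty case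
def coverMerge : List Char → List Char → Bool
  | [], b => b.isEmpty
  | _ :: _, [] => true
  | x :: xs, y :: ys =>
    if x < y then coverMerge xs (y :: ys)
    else if x = y then coverMerge xs ys
    else false

def isCover_alt (minStr : String) (t : String) : Bool :=
  let a := PySem.List.sorted minStr.toList (fun c => c) false
  let b := PySem.List.sorted t.toList (fun c => c) false
  coverMerge a b

-- ===== PRECONDITION & SPEC =====
def Spec_isCover (minStr : String) (t : String) (out : Bool) : Prop := out = isCover_alt minStr t
instance (minStr : String) (t : String) (out : Bool) : Decidable (Spec_isCover minStr t out) := by unfold Spec_isCover; infer_instance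

-- ===== CLAIM (what is proved, stated in full; the proofs are below) =====
def Claim_equal_isCover : Prop := ∀ (minStr : String) (t : String), Dom_isCover minStr t → Spec_isCover minStr t (isCover minStr t)

-- ===== LEMMAS AND PROOFS =====

-- A's first loop builds exactly Counter(minStr)
theorem foldA_eq_counter (l : List Char) :
    l.foldl (fun d i => if d.contains i then d.insert i (d.getD i 0 + 1) else d.insert i 1)
      PySem.Dict.empty = PySem.Dict.counter l := by
  rw [← PySem.Dict.foldl_insert_getD_add_one_eq_counter]
  congr 1
  funext d i
  by_cases h : d.contains i = true
  · simp [h]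
  · have h' : d.contains i = false := by simpa using h
    simp [h', PySem.Dict.getD_of_not_contains d (0:Int) h']

-- A's second loop succeeds iff the dict covers the counts of the remaining chars
theorem isCoverLoop_iff (ts : List Char) : ∀ (d : PySem.Dict Char Int),
    (∀ c, 0 ≤ d.getD c 0) →
    (isCoverLoop d ts = true ↔ ∀ c, (ts.count c : Int) ≤ d.getD c 0) := by
  induction ts with
  | nil =>
    intro d h
    simp only [isCoverLoop, true_iff]
    intro c; simpa using h c
  | cons c rest ih =>
    intro d hnn
    by_cases hc : d.contains c = true
    · by_cases h0 : d.getD c 0 = 0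
      · rw [show isCoverLoop d (c :: rest) = false by simp [isCoverLoop, hc, h0]]
        simp only [Bool.false_eq_true, false_iff]
        intro hall
        have h1 := hall c
        rw [h0, List.count_cons_self] at h1
        push_cast at h1; omega
      · rw [show isCoverLoop d (c :: rest)
              = isCoverLoop (d.insert c (d.getD c 0 - 1)) rest by
            simp [isCoverLoop, hc, h0]]
        rw [ih _ (fun c' => by
          rw [PySem.Dict.getD_insert]
          split_ifs with he
          · have := hnn c; omega
          · exact hnn c')]
        constructor
        · intro hall c'
          have h1 := hall c'
          rw [PySem.Dict.getD_insert] at h1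
          by_cases he : c' = c
          · subst he
            rw [if_pos rfl] at h1
            rw [List.count_cons_self]
            push_cast at h1 ⊢; omega
          · rw [if_neg he] at h1
            rw [List.count_cons_of_ne (Ne.symm he)]
            exact h1
        · intro hall c'
          have h1 := hall c'
          rw [PySem.Dict.getD_insert]
          by_cases he : c' = c
          · subst he
            rw [if_pos rfl]
            rw [List.count_cons_self] at h1
            push_cast at h1 ⊢; omega
          · rw [if_neg he]
            rw [List.count_cons_of_ne (Ne.symm he)] at h1
            exact h1
    · have hcf : d.contains c = false := by simpa using hc
      have hg := PySem.Dict.getD_of_not_contains d (0:Int) hcf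
      rw [show isCoverLoop d (c :: rest) = false by simp [isCoverLoop, hcf]]
      simp only [Bool.false_eq_true, false_iff]
      intro hall
      have h1 := hall c
      rw [hg, List.count_cons_self] at h1
      push_cast at h1; omega

-- the merge scan on two sorted lists decides pointwise count coverage
theorem coverMerge_iff : ∀ (a b : List Char),
    a.Pairwise (· ≤ ·) → b.Pairwise (· ≤ ·) →
    (coverMerge a b = true ↔ ∀ c, b.count c ≤ a.count c) := by
  intro a
  induction a with
  | nil =>
    intro b _ _
    cases b with
    | nil => simp [coverMerge]
    | cons y ys =>
      simp only [coverMerge, List.isEmpty_cons, Bool.false_eq_true, false_iff]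
      intro h
      have := h y
      simp [List.count_cons_self] at this
  | cons x xs ih =>
    intro b ha hb
    have hxs : xs.Pairwise (· ≤ ·) := ha.of_cons
    cases b with
    | nil => simp [coverMerge]
    | cons y ys =>
      have hys : ys.Pairwise (· ≤ ·) := hb.of_cons
      by_cases hlt : x < y
      · rw [show coverMerge (x :: xs) (y :: ys) = coverMerge xs (y :: ys) by
            simp [coverMerge, hlt]]
        rw [ih (y :: ys) hxs hb]
        have hnx : x ∉ y :: ys := by
          intro hmem
          rcases List.mem_cons.mp hmem with h | h
          · exact absurd h (ne_of_lt hlt)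
          · have := List.rel_of_pairwise_cons hb h
            exact absurd (lt_of_lt_of_le hlt this) (lt_irrefl x)
        constructor
        · intro h c
          exact (h c).trans (List.count_le_count_cons ..)
        · intro h c
          by_cases he : c = x
          · subst he
            rw [List.count_eq_zero_of_not_mem hnx]
            exact Nat.zero_le _
          · have := h c
            rwa [List.count_cons_of_ne (Ne.symm he)] at this
      · by_cases heq : x = y
        · rw [show coverMerge (x :: xs) (y :: ys) = coverMerge xs ys by
              simp [coverMerge, heq]]
          subst heq
          rw [ih ys hxs hys]
          constructor
          · intro h c
            have h1 := h c
            by_cases he : c = x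
            · subst he
              rw [List.count_cons_self, List.count_cons_self]
              omega
            · rw [List.count_cons_of_ne (Ne.symm he), List.count_cons_of_ne (Ne.symm he)]
              exact h1
          · intro h c
            have h1 := h c
            by_cases he : c = x
            · subst he
              rw [List.count_cons_self, List.count_cons_self] at h1
              omega
            · rw [List.count_cons_of_ne (Ne.symm he), List.count_cons_of_ne (Ne.symm he)] at h1
              exact h1
        · have hgt : y < x := lt_of_le_of_ne (not_lt.mp hlt) (Ne.symm heq)
          rw [show coverMerge (x :: xs) (y :: ys) = false by
              simp [coverMerge, hlt, heq]]
          simp only [Bool.false_eq_true, false_iff]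
          intro h
          have hny : y ∉ x :: xs := by
            intro hmem
            rcases List.mem_cons.mp hmem with hm | hm
            · exact absurd hm (ne_of_lt hgt)
            · have := List.rel_of_pairwise_cons ha hm
              exact absurd (lt_of_lt_of_le hgt this) (lt_irrefl y)
          have := h y
          rw [List.count_eq_zero_of_not_mem hny, List.count_cons_self] at this
          omega

-- B's value, characterised
theorem alt_iff (minStr t : String) :
    isCover_alt minStr t = true ↔
      ∀ c, t.toList.count c ≤ minStr.toList.count c := by
  unfold isCover_alt
  rw [coverMerge_iff _ _ (by simpa using PySem.List.sorted_pairwise minStr.toList (fun c => c) )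
        (by simpa using PySem.List.sorted_pairwise t.toList (fun c => c))]
  constructor
  · intro h c
    have := h c
    rwa [(PySem.List.sorted_perm t.toList (fun c => c) false).count_eq,
         (PySem.List.sorted_perm minStr.toList (fun c => c) false).count_eq] at this
  · intro h c
    rw [(PySem.List.sorted_perm t.toList (fun c => c) false).count_eq,
        (PySem.List.sorted_perm minStr.toList (fun c => c) false).count_eq]
    exact h c

-- pigeonhole: pointwise count coverage bounds the total length
theorem length_le_of_count_le (a b : List Char)
    (h : ∀ c, a.count c ≤ b.count c) : a.length ≤ b.length := by
  have hle : (↑a : Multiset Char) ≤ ↑b := by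
    rw [Multiset.le_iff_count]
    intro x
    simpa using h x
  simpa using Multiset.card_le_card hle

-- ===== VERDICT (by name: the statement is the Claim_ definition above) =====
theorem isCover_spec : Claim_equal_isCover := by
  intro minStr t _
  unfold Spec_isCover
  rw [Bool.eq_iff_iff]
  simp only [isCover]
  split_ifs with hlt
  · simp only [false_iff]
    rw [alt_iff]
    intro hall
    have hlen : t.toList.length ≤ minStr.toList.length :=
      length_le_of_count_le _ _ hall
    rw [PySem.Str.len_eq, PySem.Str.len_eq] at hlt
    omega
  · rw [foldA_eq_counter,
        isCoverLoop_iff _ _ (fun c => by rw [PySem.Dict.getD_counter]; positivity),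
        alt_iff]
    simp only [PySem.Dict.getD_counter]
    constructor
    · intro h c; exact_mod_cast h c
    · intro h c; exact_mod_cast h c
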